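-- pv_equiv track=rewrite | github.com/BinKes/numeric-range-to-regExp | regNumericRange.py | prev_num
-- ===== SOURCE A (Python) =====
-- def prev_num(num):
--     chars = list(str(num))
--     for j in range(len(chars)):
--         i = len(chars) - j - 1
--         if chars[i] == '9':
--             chars[i] = '0'
--         else:
--             chars[i] = '0'
--             break
--     chars = ''.join(chars)
--     return int(chars)
-- ===== SOURCE B (Python) =====
-- def prev_num(num):
--     sign = -1 if num < 0 else 1
--     n = abs(num)
--     p = 1
--     while n // p % 10 == 9:
--         p *= 10
--     return sign * (n // (p * 10) * (p * 10))
-- ===== Notes on version B (the rewrite author's own statement) =====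
-- stated objective: faster
-- what changed: Replaces str()/char-list mutation/int() round-trip by pure integer arithmetic: count trailing 9s with division by a growing power of ten, then truncate with one floor division.
import Mathlib
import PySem

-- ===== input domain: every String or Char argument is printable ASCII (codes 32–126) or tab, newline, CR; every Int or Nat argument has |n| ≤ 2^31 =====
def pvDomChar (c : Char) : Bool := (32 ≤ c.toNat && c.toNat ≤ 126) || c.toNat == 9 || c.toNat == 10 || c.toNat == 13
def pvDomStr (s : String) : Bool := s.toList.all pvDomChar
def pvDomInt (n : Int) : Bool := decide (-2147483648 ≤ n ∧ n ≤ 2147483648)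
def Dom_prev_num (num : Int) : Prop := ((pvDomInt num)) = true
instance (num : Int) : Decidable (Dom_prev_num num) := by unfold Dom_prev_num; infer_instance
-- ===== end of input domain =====

-- B replaces A's str()/char-mutation/int() round-trip by pure integer arithmetic (skip trailing
-- nines by division, then truncate); same return value on every int, proved below for all Int.

-- ===== PORT A =====
-- Hand port of Python's int(s), step for step: optional leading '-', then ASCII digits
-- accumulated left to right (exact for the strings this program builds — '-'?[0-9]+ :
-- PySem.Int.ofChars? agrees on those, but its digit parser is private to the prelude,
-- so it cannot be reasoned about symbolically; no whitespace/'+'/underscores ever occur here).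
def pvDigitsGo : List Char → Nat → Option Nat
  | [], acc => some acc
  | c :: r, acc => if c.isDigit then pvDigitsGo r (acc * 10 + (c.toNat - 48)) else none

def pvDigitsVal? (ds : List Char) : Option Nat :=
  if ds = [] then none else pvDigitsGo ds 0

def pvInt? : List Char → Option Int
  | [] => none
  | c :: ds =>
    if c = '-' then (pvDigitsVal? ds).map (fun v => -(v : Int))
    else (pvDigitsVal? (c :: ds)).map (fun v => (v : Int))

-- the 'for j in range(len(chars))' loop with its break; fuel = iterations remaining
def loopAGo : List Char → Nat → Nat → List Char
  | chars, _, 0 => chars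
  | chars, j, fuel + 1 =>
    let i := chars.length - j - 1
    if chars.getD i ' ' = '9' then loopAGo (chars.set i '0') (j + 1) fuel
    else chars.set i '0'

def prev_num (num : Int) : Int :=
  let chars := PySem.Int.toChars num
  let chars2 := loopAGo chars 0 chars.length
  (pvInt? chars2).getD 0   -- int() cannot raise here (chars2 is always '-'?digits); none is unreachable

-- ===== PORT B =====
-- the 'while n // p % 10 == 9' loop; fuel n+1 exceeds the possible iteration count
def altLoopGo (n : Nat) : Nat → Nat → Nat
  | p, 0 => p
  | p, fuel + 1 => if n / p % 10 = 9 then altLoopGo n (p * 10) fuel else p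

def prev_num_alt (num : Int) : Int :=
  let sign : Int := if num < 0 then -1 else 1
  let n : Nat := num.natAbs        -- abs(num): operands stay nonnegative, so Nat // and % are Python-exact
  let p := altLoopGo n 1 (n + 1)
  sign * ((n / (p * 10) * (p * 10) : Nat) : Int)

-- ===== PRECONDITION & SPEC =====
def Spec_prev_num (num : Int) (out : Int) : Prop := out = prev_num_alt num
instance (num : Int) (out : Int) : Decidable (Spec_prev_num num out) := by unfold Spec_prev_num; infer_instance

-- ===== CLAIM (what is proved, stated in full; the proofs are below) =====
def Claim_equal_prev_num : Prop := ∀ (num : Int), Dom_prev_num num → Spec_prev_num num (prev_num num)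

-- ===== LEMMAS AND PROOFS =====

-- right-to-left digit zeroing on the REVERSED char list: what A's loop computes
def zeroTail : List Char → List Char
  | [] => []
  | c :: rest => if c = '9' then '0' :: zeroTail rest else '0' :: rest

-- B's value on the absolute value m
def Bval (m : Nat) : Nat :=
  m / (altLoopGo m 1 (m + 1) * 10) * (altLoopGo m 1 (m + 1) * 10)

lemma getD_mid (xs ys : List Char) (y d : Char) : (xs ++ y :: ys).getD xs.length d = y := by
  simp [List.getD_eq_getElem?_getD]

lemma set_mid (xs ys : List Char) (y v : Char) : (xs ++ y :: ys).set xs.length v = xs ++ v :: ys := by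
  rw [List.set_append]; simp

lemma loopAGo_eq (front : List Char) : ∀ done : List Char,
    loopAGo (front ++ done) done.length front.length = (zeroTail front.reverse).reverse ++ done := by
  induction front using List.reverseRecOn with
  | nil => intro done; simp [zeroTail, loopAGo]
  | append_singleton init c ih =>
    intro done
    have hi : (init ++ c :: done).length - done.length - 1 = init.length := by simp; omega
    rw [List.append_assoc, List.singleton_append]
    simp only [List.length_append, List.length_singleton]
    rw [show init.length + 1 = init.length + 1 from rfl]
    rw [loopAGo]
    simp only [hi, getD_mid, set_mid]
    by_cases hc : c = '9'
    · subst hc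
      rw [if_pos rfl]
      have := ih ('0' :: done)
      simp only [List.length_cons] at this
      rw [this]
      simp [zeroTail]
    · rw [if_neg hc]
      simp [zeroTail, hc]

lemma pvDigitsGo_append (xs ys : List Char) : ∀ acc,
    pvDigitsGo (xs ++ ys) acc = (pvDigitsGo xs acc).bind (fun a => pvDigitsGo ys a) := by
  induction xs with
  | nil => intro acc; simp [pvDigitsGo]
  | cons c r ih =>
    intro acc
    simp only [List.cons_append, pvDigitsGo]
    by_cases h : c.isDigit
    · simp [h, ih]
    · simp [h]

lemma digitChar_isDigit {v : Nat} (h : v < 10) : (Nat.digitChar v).isDigit = true := by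
  interval_cases v <;> decide

lemma digitChar_toNat {v : Nat} (h : v < 10) : (Nat.digitChar v).toNat - 48 = v := by
  interval_cases v <;> decide

lemma digitChar_eq_nine {v : Nat} (h : v < 10) : Nat.digitChar v = '9' ↔ v = 9 := by
  interval_cases v <;> simp <;> decide

lemma digit_ne_dash {c : Char} (h : c.isDigit = true) : c ≠ '-' := by
  rintro rfl; exact absurd h (by decide)

lemma goVal (m : Nat) : ∀ acc, pvDigitsGo (Nat.toDigits 10 m) acc
    = some (acc * 10 ^ (Nat.toDigits 10 m).length + m) := by
  induction m using Nat.strong_induction_on with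
  | _ m ih =>
    intro acc
    by_cases hm : m < 10
    · rw [Nat.toDigits_of_lt_base hm]
      simp [pvDigitsGo, digitChar_isDigit hm, digitChar_toNat hm]
    · rw [Nat.toDigits_eq_if (by norm_num : (1:Nat) < 10), if_neg hm]
      rw [pvDigitsGo_append, ih (m / 10) (by omega)]
      have h10 : m % 10 < 10 := Nat.mod_lt _ (by norm_num)
      simp only [Option.bind_some, pvDigitsGo, digitChar_isDigit h10, if_pos,
        digitChar_toNat h10, List.length_append, List.length_singleton]
      congr 1
      have hdm : m / 10 * 10 + m % 10 = m := by omega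
      have : (acc * 10 ^ (Nat.toDigits 10 (m / 10)).length + m / 10) * 10 + m % 10
          = acc * 10 ^ ((Nat.toDigits 10 (m / 10)).length + 1) + (m / 10 * 10 + m % 10) := by
        ring
      rw [this, hdm]

lemma valDigits (m : Nat) : pvDigitsVal? (Nat.toDigits 10 m) = some m := by
  have hne : Nat.toDigits 10 m ≠ [] := by
    have := @Nat.length_toDigits_pos 10 m
    intro h; rw [h] at this; simp at this
  rw [pvDigitsVal?, if_neg hne, goVal]
  simp

lemma val_concat_zero (xs : List Char) (h : xs ≠ []) :
    pvDigitsVal? (xs ++ ['0']) = (pvDigitsVal? xs).map (· * 10) := by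
  rw [pvDigitsVal?, pvDigitsVal?, if_neg (by simp), if_neg h, pvDigitsGo_append]
  cases hgo : pvDigitsGo xs 0 with
  | none => simp
  | some a => simp [pvDigitsGo]

lemma val_replicate_zero (j : Nat) : ∀ acc, pvDigitsGo (List.replicate j '0') acc = some (acc * 10 ^ j) := by
  induction j with
  | zero => intro acc; simp [pvDigitsGo]
  | succ j ih =>
    intro acc
    have hd : ('0' : Char).isDigit = true := by decide
    simp only [List.replicate_succ, pvDigitsGo]
    rw [if_pos hd, ih]
    congr 1
    have h0 : ('0' : Char).toNat - 48 = 0 := by decide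
    rw [h0]
    ring

lemma mem_zeroTail {c : Char} {xs : List Char} (h : c ∈ zeroTail xs) : c = '0' ∨ c ∈ xs := by
  induction xs with
  | nil => simp [zeroTail] at h
  | cons a r ih =>
    simp only [zeroTail] at h
    by_cases ha : a = '9'
    · rw [if_pos ha] at h
      rcases List.mem_cons.1 h with h1 | h2
      · exact Or.inl h1
      · rcases ih h2 with h3 | h4
        · exact Or.inl h3
        · exact Or.inr (List.mem_cons_of_mem _ h4)
    · rw [if_neg ha] at h
      rcases List.mem_cons.1 h with h1 | h2
      · exact Or.inl h1
      · exact Or.inr (List.mem_cons_of_mem _ h2)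

lemma length_zeroTail (xs : List Char) : (zeroTail xs).length = xs.length := by
  induction xs with
  | nil => rfl
  | cons a r ih => simp only [zeroTail]; split <;> simp [ih]

lemma zeroTail_append_exists (xs ys : List Char) (h : ∃ c ∈ xs, c ≠ '9') :
    zeroTail (xs ++ ys) = zeroTail xs ++ ys := by
  induction xs with
  | nil => obtain ⟨c, hc, _⟩ := h; simp at hc
  | cons a r ih =>
    simp only [List.cons_append, zeroTail]
    by_cases ha : a = '9'
    · have hr : ∃ c ∈ r, c ≠ '9' := by
        obtain ⟨c, hc, hc9⟩ := h
        rcases List.mem_cons.1 hc with h1 | h2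
        · exact absurd (h1.trans ha) hc9
        · exact ⟨c, h2, hc9⟩
      rw [if_pos ha, if_pos ha, ih hr]
      simp
    · rw [if_neg ha, if_neg ha]; simp

lemma zeroTail_append_all9 (xs ys : List Char) (h : ∀ c ∈ xs, c = '9') :
    zeroTail (xs ++ ys) = List.replicate xs.length '0' ++ zeroTail ys := by
  induction xs with
  | nil => simp
  | cons a r ih =>
    have ha : a = '9' := h a (List.mem_cons_self)
    simp only [List.cons_append, zeroTail, if_pos ha, List.length_cons, List.replicate_succ]
    rw [ih (fun c hc => h c (List.mem_cons_of_mem _ hc))]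

lemma altLoopGo_shift (n p : Nat) : ∀ f, altLoopGo n (10 * p) f = 10 * altLoopGo (n / 10) p f := by
  intro f
  induction f generalizing p with
  | zero => simp [altLoopGo, Nat.mul_comm]
  | succ f ih =>
    simp only [altLoopGo]
    have hd : n / (10 * p) = n / 10 / p := (Nat.div_div_eq_div_mul n 10 p).symm
    rw [hd]
    by_cases h : n / 10 / p % 10 = 9
    · rw [if_pos h, if_pos h, show 10 * p * 10 = 10 * (p * 10) by ring, ih]
    · rw [if_neg h, if_neg h, Nat.mul_comm]

lemma altLoopGo_congr (n : Nat) : ∀ f g p, 0 < p → n < p * 10 ^ f → n < p * 10 ^ g →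
    altLoopGo n p f = altLoopGo n p g := by
  intro f
  induction f with
  | zero =>
    intro g p hp hf hg
    simp only [pow_zero, mul_one] at hf
    have h0 : n / p = 0 := Nat.div_eq_of_lt hf
    cases g with
    | zero => rfl
    | succ g => simp [altLoopGo, h0]
  | succ f ih =>
    intro g p hp hf hg
    cases g with
    | zero =>
      simp only [pow_zero, mul_one] at hg
      have h0 : n / p = 0 := Nat.div_eq_of_lt hg
      simp [altLoopGo, h0]
    | succ g =>
      simp only [altLoopGo]
      by_cases h : n / p % 10 = 9
      · rw [if_pos h, if_pos h]
        exact ih g (p * 10) (by positivity)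
          (by rw [pow_succ] at hf; calc n < p * (10 ^ f * 10) := hf
              _ = p * 10 * 10 ^ f := by ring)
          (by rw [pow_succ] at hg; calc n < p * (10 ^ g * 10) := hg
              _ = p * 10 * 10 ^ g := by ring)
      · rw [if_neg h, if_neg h]

lemma lt_pow10 (m : Nat) : m < 10 ^ (m + 1) := by
  calc m < 10 ^ m := Nat.lt_pow_self (by norm_num)
    _ ≤ 10 ^ (m + 1) := Nat.pow_le_pow_right (by norm_num) (by omega)

lemma Bstep9 {m : Nat} (h : m % 10 = 9) : Bval m = 10 * Bval (m / 10) := by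
  set A := altLoopGo (m / 10) 1 (m / 10 + 1) with hA
  have hp : altLoopGo m 1 (m + 1) = 10 * A := by
    have h1 : altLoopGo m 1 (m + 1) = altLoopGo m 10 m := by
      simp only [altLoopGo, Nat.div_one]
      rw [if_pos h]
    have h2 : altLoopGo m 10 m = 10 * altLoopGo (m / 10) 1 m := by
      simpa using altLoopGo_shift m 1 m
    have h3 : altLoopGo (m / 10) 1 m = A := by
      apply altLoopGo_congr
      · norm_num
      · simpa using lt_of_le_of_lt (Nat.div_le_self m 10) (Nat.lt_pow_self (by norm_num))
      · simpa using lt_pow10 (m / 10)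
    rw [h1, h2, h3]
  unfold Bval
  rw [hp, ← hA]
  have e1 : 10 * A * 10 = 10 * (A * 10) := by ring
  rw [e1, ← Nat.div_div_eq_div_mul]
  ring

lemma Bstep_ne9 {m : Nat} (h : m % 10 ≠ 9) : Bval m = m / 10 * 10 := by
  unfold Bval
  have hp : altLoopGo m 1 (m + 1) = 1 := by
    simp [altLoopGo, Nat.div_one, h]
  rw [hp]

lemma loop_out_ne_nil (m : Nat) : (zeroTail (Nat.toDigits 10 m).reverse).reverse ≠ [] := by
  intro h
  have h1 : ((zeroTail (Nat.toDigits 10 m).reverse).reverse).length = 0 := by rw [h]; rfl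
  rw [List.length_reverse, length_zeroTail, List.length_reverse] at h1
  have := @Nat.length_toDigits_pos 10 m
  omega

lemma main_pos (m : Nat) :
    pvDigitsVal? ((zeroTail (Nat.toDigits 10 m).reverse).reverse) = some (Bval m) := by
  induction m using Nat.strong_induction_on with
  | _ m ih =>
    by_cases hm : m < 10
    · interval_cases m <;> decide
    · rw [Nat.toDigits_eq_if (by norm_num : (1:Nat) < 10), if_neg hm]
      have h10 : m % 10 < 10 := Nat.mod_lt _ (by norm_num)
      rw [List.reverse_append]
      simp only [List.reverse_singleton, List.singleton_append]
      by_cases h9 : m % 10 = 9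
      · have hc : Nat.digitChar (m % 10) = '9' := (digitChar_eq_nine h10).2 h9
        rw [hc]
        rw [show zeroTail ('9' :: (Nat.toDigits 10 (m / 10)).reverse)
            = '0' :: zeroTail ((Nat.toDigits 10 (m / 10)).reverse) from by simp [zeroTail]]
        rw [List.reverse_cons]
        rw [val_concat_zero _ (loop_out_ne_nil (m / 10)), ih (m / 10) (by omega), Bstep9 h9]
        simp [Nat.mul_comm]
      · have hc : Nat.digitChar (m % 10) ≠ '9' := fun hh => h9 ((digitChar_eq_nine h10).1 hh)
        rw [show zeroTail (Nat.digitChar (m % 10) :: (Nat.toDigits 10 (m / 10)).reverse)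
            = '0' :: (Nat.toDigits 10 (m / 10)).reverse from by simp [zeroTail, hc]]
        rw [List.reverse_cons, List.reverse_reverse]
        rw [val_concat_zero _ (by
          have hpos := @Nat.length_toDigits_pos 10 (m / 10)
          intro hnil
          rw [hnil] at hpos; simp at hpos)]
        rw [valDigits, Bstep_ne9 h9]
        simp

lemma Bval_all9 (m : Nat) (h : ∀ c ∈ Nat.toDigits 10 m, c = '9') : Bval m = 0 := by
  induction m using Nat.strong_induction_on with
  | _ m ih =>
    by_cases hm : m < 10
    · have h9 : Nat.digitChar m = '9' := by
        apply h; rw [Nat.toDigits_of_lt_base hm]; simp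
      have : m = 9 := (digitChar_eq_nine hm).1 h9
      subst this; decide
    · rw [Nat.toDigits_eq_if (by norm_num : (1:Nat) < 10), if_neg hm] at h
      have h10 : m % 10 < 10 := Nat.mod_lt _ (by norm_num)
      have hlast : Nat.digitChar (m % 10) = '9' := by
        apply h; simp
      have h9 : m % 10 = 9 := (digitChar_eq_nine h10).1 hlast
      rw [Bstep9 h9, ih (m / 10) (by omega) (fun c hc => h c (by simp [hc]))]

lemma pvInt?_digits {c : Char} (rest : List Char) (h : c ≠ '-') :
    pvInt? (c :: rest) = (pvDigitsVal? (c :: rest)).map (fun v => (v : Int)) := by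
  simp [pvInt?, h]

lemma head_loop_out (m : Nat) {c : Char} {rest : List Char}
    (h : (zeroTail (Nat.toDigits 10 m).reverse).reverse = c :: rest) : c ≠ '-' := by
  have hc : c ∈ (zeroTail (Nat.toDigits 10 m).reverse).reverse := by rw [h]; simp
  rw [List.mem_reverse] at hc
  rcases mem_zeroTail hc with h0 | hmem
  · subst h0; decide
  · rw [List.mem_reverse] at hmem
    exact digit_ne_dash (Nat.isDigit_of_mem_toDigits (by norm_num) (by norm_num) hmem)

theorem prev_eq (num : Int) : prev_num num = prev_num_alt num := by
  have key : ∀ chars : List Char, loopAGo chars 0 chars.length = (zeroTail chars.reverse).reverse := by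
    intro chars; simpa using loopAGo_eq chars []
  have halt : prev_num_alt num
      = (if num < 0 then (-1 : Int) else 1) * ((Bval num.natAbs : Int)) := rfl
  by_cases hneg : num < 0
  · have hchars : PySem.Int.toChars num = '-' :: Nat.toDigits 10 num.natAbs := by
      simp [PySem.Int.toChars, hneg]
    rw [halt, if_pos hneg]
    simp only [prev_num, hchars, key, List.reverse_cons]
    by_cases hex : ∃ c ∈ (Nat.toDigits 10 num.natAbs).reverse, c ≠ '9'
    · rw [zeroTail_append_exists _ _ hex, List.reverse_append]
      simp only [List.reverse_singleton, List.singleton_append]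
      rw [show pvInt? ('-' :: (zeroTail (Nat.toDigits 10 num.natAbs).reverse).reverse)
          = (pvDigitsVal? ((zeroTail (Nat.toDigits 10 num.natAbs).reverse).reverse)).map
              (fun v => -(v : Int)) from by simp [pvInt?]]
      rw [main_pos]
      simp
    · have hall : ∀ c ∈ (Nat.toDigits 10 num.natAbs).reverse, c = '9' := by
        intro c hc
        by_contra h9
        exact hex ⟨c, hc, h9⟩
      rw [zeroTail_append_all9 _ _ hall]
      rw [show zeroTail ['-'] = ['0'] from by simp [zeroTail]]
      rw [List.reverse_append]
      simp only [List.reverse_singleton, List.singleton_append, List.reverse_replicate]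
      rw [pvInt?_digits _ (by decide)]
      rw [show pvDigitsVal? ('0' :: List.replicate (Nat.toDigits 10 num.natAbs).reverse.length '0')
          = some 0 from by
        rw [show ('0' :: List.replicate (Nat.toDigits 10 num.natAbs).reverse.length '0')
            = List.replicate ((Nat.toDigits 10 num.natAbs).reverse.length + 1) '0' from by
          simp [List.replicate_succ]]
        rw [pvDigitsVal?, if_neg (by simp), val_replicate_zero]
        simp]
      rw [show Bval num.natAbs = 0 from
        Bval_all9 num.natAbs (fun c hc => hall c (List.mem_reverse.2 hc))]
      simp
  · have hchars : PySem.Int.toChars num = Nat.toDigits 10 num.natAbs := by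
      simp only [PySem.Int.toChars, if_neg hneg]
      congr 1
      omega
    rw [halt, if_neg hneg, one_mul]
    simp only [prev_num, hchars, key]
    obtain ⟨c, rest, hcr⟩ := List.exists_cons_of_ne_nil (loop_out_ne_nil num.natAbs)
    rw [hcr, pvInt?_digits _ (head_loop_out num.natAbs hcr), ← hcr, main_pos]
    simp

-- ===== VERDICT (by name: the statement is the Claim_ definition above) =====
theorem prev_num_spec : Claim_equal_prev_num := by
  intro num _
  unfold Spec_prev_num
  exact prev_eq num
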